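-- pv_equiv track=rewrite | github.com/lcieslicki/ourRAG | backend/app/domain/parsers/plaintext.py | normalize_plaintext
-- ===== SOURCE A (Python) =====
-- def normalize_plaintext(text: str) -> str:
--     """Normalize line endings and preserve structure."""
--     normalized = text.replace("\r\n", "\n").replace("\r", "\n")
--     lines = [line.rstrip() for line in normalized.split("\n")]
--     collapsed: list[str] = []
--     blank_count = 0
--
--     for line in lines:
--         if line.strip() == "":
--             blank_count += 1
--             if blank_count <= 2:
--                 collapsed.append("")
--             continue
--
--         blank_count = 0
--         collapsed.append(line)
--
--     return "\n".join(collapsed).strip() + "\n"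
-- ===== SOURCE B (Python) =====
-- def normalize_plaintext(text: str) -> str:
--     """Normalize line endings and preserve structure."""
--     lines = [line.rstrip() for line in text.replace("\r\n", "\n").replace("\r", "\n").split("\n")]
--     collapsed: list[str] = []
--     i, n = 0, len(lines)
--     while i < n:
--         if lines[i].strip():
--             collapsed.append(lines[i])
--             i += 1
--         else:
--             j = i
--             while j < n and not lines[j].strip():
--                 j += 1
--             collapsed.extend([""] * min(j - i, 2))
--             i = j
--     return "\n".join(collapsed).strip() + "\n"
-- ===== Notes on version B (the rewrite author's own statement) =====
-- stated objective: alternative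
-- what changed: replaces the stateful blank_count-counter loop with a maximal-blank-run scan that emits min(run,2) blank lines per run and copies non-blank lines directly
import Mathlib
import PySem

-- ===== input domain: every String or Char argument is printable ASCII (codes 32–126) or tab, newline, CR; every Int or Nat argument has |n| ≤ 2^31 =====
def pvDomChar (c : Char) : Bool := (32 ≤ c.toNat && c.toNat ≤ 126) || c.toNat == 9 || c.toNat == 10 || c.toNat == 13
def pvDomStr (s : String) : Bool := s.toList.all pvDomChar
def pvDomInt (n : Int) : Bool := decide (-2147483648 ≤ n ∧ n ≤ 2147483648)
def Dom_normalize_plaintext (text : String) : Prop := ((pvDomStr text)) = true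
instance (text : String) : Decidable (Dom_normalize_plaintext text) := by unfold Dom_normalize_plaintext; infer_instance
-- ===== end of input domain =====

-- B replaces A's stateful blank_count loop by a maximal-blank-run scan emitting min(run,2) blanks (alternative decomposition, same cost).

-- ===== PORT A =====
-- the for-loop over `lines` with state (collapsed, blank_count), as a foldl
def normalize_plaintext (text : String) : String :=
  let normalized := PySem.Str.replace (PySem.Str.replace text "\r\n" "\n") "\r" "\n"
  let lines : List String := ((PySem.Str.split? normalized "\n").getD []).map PySem.Str.rstrip
  let st := lines.foldl (fun (st : List String × Nat) line =>
      if PySem.Str.strip line == "" then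
        let bc := st.2 + 1
        (if bc ≤ 2 then st.1 ++ [""] else st.1, bc)
      else (st.1 ++ [line], 0)) (([] : List String), 0)
  PySem.Str.strip (PySem.Str.join "\n" st.1) ++ "\n"

-- ===== PORT B =====
-- B's outer while over the remaining suffix; the inner while counting the blank run is the takeWhile length
def collapseRuns : List String → List String
  | [] => []
  | l :: rest =>
    if h : PySem.Str.strip l ≠ "" then
      l :: collapseRuns rest
    else
      let k := ((l :: rest).takeWhile (fun s => PySem.Str.strip s == "")).length
      List.replicate (min k 2) "" ++ collapseRuns ((l :: rest).drop k)
termination_by ls => ls.length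
decreasing_by
  · simp
  · simp only [List.length_drop]
    have hpl : (fun s => PySem.Str.strip s == "") l = true := by
      simp only [ne_eq, Decidable.not_not] at h
      simp [h]
    simp only [List.takeWhile_cons, hpl, if_true, List.length_cons]
    omega

def normalize_plaintext_alt (text : String) : String :=
  let lines : List String := ((PySem.Str.split? (PySem.Str.replace (PySem.Str.replace text "\r\n" "\n") "\r" "\n") "\n").getD []).map PySem.Str.rstrip
  PySem.Str.strip (PySem.Str.join "\n" (collapseRuns lines)) ++ "\n"

-- ===== PRECONDITION & SPEC =====
def Spec_normalize_plaintext (text : String) (out : String) : Prop := out = normalize_plaintext_alt text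
instance (text : String) (out : String) : Decidable (Spec_normalize_plaintext text out) := by unfold Spec_normalize_plaintext; infer_instance

-- ===== CLAIM (what is proved, stated in full; the proofs are below) =====
def Claim_equal_normalize_plaintext : Prop := ∀ (text : String), Dom_normalize_plaintext text → Spec_normalize_plaintext text (normalize_plaintext text)

-- ===== LEMMAS AND PROOFS =====

-- A's loop body as a recursion on the remaining lines with blank counter b
def loopA (b : Nat) : List String → List String
  | [] => []
  | l :: t =>
    if PySem.Str.strip l == "" then
      (if b + 1 ≤ 2 then [""] else []) ++ loopA (b + 1) t
    else l :: loopA 0 t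

theorem foldA_eq_loopA (ls : List String) (acc : List String) (b : Nat) :
    (ls.foldl (fun (st : List String × Nat) line =>
      if PySem.Str.strip line == "" then
        let bc := st.2 + 1
        (if bc ≤ 2 then st.1 ++ [""] else st.1, bc)
      else (st.1 ++ [line], 0)) (acc, b)).1 = acc ++ loopA b ls := by
  induction ls generalizing acc b with
  | nil => simp [loopA]
  | cons l t ih =>
    simp only [List.foldl_cons, loopA]
    by_cases h : (PySem.Str.strip l == "") = true
    · simp only [h, if_true]
      by_cases h2 : b + 1 ≤ 2
      · simp only [h2, if_true]
        rw [ih]; simp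
      · simp only [h2, if_false]
        rw [ih]; simp
    · simp only [h]
      rw [ih]; simp

theorem loopA_blankRun : ∀ (r : List String) (b : Nat) (rest : List String),
    (∀ x ∈ r, (PySem.Str.strip x == "") = true) →
    loopA b (r ++ rest)
      = List.replicate (min r.length (2 - min b 2)) "" ++ loopA (b + r.length) rest := by
  intro r
  induction r with
  | nil => intro b rest _; simp
  | cons x r' ih =>
    intro b rest hr
    have hx : (PySem.Str.strip x == "") = true := hr x (by simp)
    simp only [List.cons_append, loopA, hx, if_true]
    rw [ih (b + 1) rest (fun y hy => hr y (List.mem_cons_of_mem x hy))]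
    have harg : b + (x :: r').length = b + 1 + r'.length := by simp; omega
    rw [← harg]
    by_cases hb : b + 1 ≤ 2
    · have h1 : (if b + 1 ≤ 2 then ([""] : List String) else []) = List.replicate 1 "" := by
        simp [hb]
      rw [h1, ← List.append_assoc, ← List.replicate_add]
      congr 2
      simp only [List.length_cons]
      omega
    · have h1 : (if b + 1 ≤ 2 then ([""] : List String) else []) = List.replicate 0 "" := by
        simp [hb]
      rw [h1, ← List.append_assoc, ← List.replicate_add]
      congr 2
      simp only [List.length_cons]
      omega

theorem loopA_nonblank_head (rest : List String) (b : Nat)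
    (h : ∀ x ∈ rest.head?, (PySem.Str.strip x == "") = false) :
    loopA b rest = loopA 0 rest := by
  cases rest with
  | nil => rfl
  | cons x t =>
    have hx := h x (by simp)
    simp [loopA, hx]

set_option maxHeartbeats 1000000 in
theorem loopA_eq_collapseRuns (ls : List String) : loopA 0 ls = collapseRuns ls := by
  induction hn : ls.length using Nat.strong_induction_on generalizing ls with
  | _ n ih =>
  cases ls with
  | nil => simp [loopA, collapseRuns]
  | cons l rest =>
    by_cases h : PySem.Str.strip l ≠ ""
    · have hb : (PySem.Str.strip l == "") = false := by
        simpa using h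
      rw [collapseRuns, dif_pos h]
      simp only [loopA, hb]
      subst hn
      rw [ih rest.length (by simp) rest rfl]
      simp
    · rw [collapseRuns, dif_neg h]
      simp only [ne_eq, Decidable.not_not] at h
      have hbl : (fun s => PySem.Str.strip s == "") l = true := by simp [h]
      set p : String → Bool := fun s => PySem.Str.strip s == "" with hp
      set k := ((l :: rest).takeWhile p).length with hk
      have hsplit : (l :: rest) = (l :: rest).takeWhile p ++ (l :: rest).dropWhile p :=
        (List.takeWhile_append_dropWhile).symm
      have hklen : k ≤ (l :: rest).length := by
        conv_rhs => rw [hsplit]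
        rw [List.length_append, hk]
        omega
      have hdrop : (l :: rest).drop k = (l :: rest).dropWhile p := by
        conv_lhs => rw [hsplit]
        rw [List.drop_append_of_le_length (le_of_eq hk),
          List.drop_eq_nil_of_le (le_of_eq hk.symm), List.nil_append]
      have hkpos : 0 < k := by
        rw [hk]
        simp [hbl]
      have hallblank : ∀ x ∈ (l :: rest).takeWhile p, (PySem.Str.strip x == "") = true := by
        intro x hx
        exact List.mem_takeWhile_imp (p := p) hx
      conv_lhs => rw [hsplit]
      rw [loopA_blankRun _ _ _ hallblank]
      rw [loopA_nonblank_head _ _ (by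
        intro x hx
        have hh := List.head?_dropWhile_not p (l :: rest)
        cases hd : ((l :: rest).dropWhile p).head? with
        | none => simp [hd] at hx
        | some y =>
          rw [hd] at hh hx
          simp only [Option.mem_def, Option.some.injEq] at hx
          subst hx
          exact hh)]
      rw [← hdrop]
      have hmin : min ((l :: rest).takeWhile p).length (2 - min 0 2) = min k 2 := by
        rw [hk]; simp
      rw [hmin]
      congr 1
      subst hn
      refine ih ((l :: rest).drop k).length ?_ _ rfl
      simp only [List.length_drop]
      simp only [List.length_cons] at hklen ⊢
      omega

-- ===== VERDICT (by name: the statement is the Claim_ definition above) =====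
theorem normalize_plaintext_spec : Claim_equal_normalize_plaintext := by
  intro text _
  simp only [Spec_normalize_plaintext, normalize_plaintext, normalize_plaintext_alt,
    foldA_eq_loopA, List.nil_append, loopA_eq_collapseRuns]
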